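-- pv_equiv track=rewrite | github.com/Indhuvanguru/AI-Enhanced-EHR-Imaging-Documentation-System | Milestone - 2/src/image_processing.py | get_key
-- ===== SOURCE A (Python) =====
-- def get_key(fname: str):
--
--     # Normalize filenames to a base key used to match HR/LR pairs.
--     # Removes common suffixes like _HR, _LR, _HR_aug, _LR_aug and file extension.
--     # Lowercases for robust matching.
--
--     name = fname.lower()
--     # strip extension
--     for ext in (".png", ".jpg", ".jpeg"):
--         if name.endswith(ext):
--             name = name[: -len(ext)]
--             break
--     # remove known suffixes
--     for suf in ("_hr_aug", "_lr_aug", "_hr", "_lr"):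
--         if name.endswith(suf):
--             name = name[: -len(suf)]
--             break
--     return name
-- ===== SOURCE B (Python) =====
-- _EXTS = ("png", "jpg", "jpeg")
--
-- def get_key(fname: str):
--     # Tokenize from the right with rpartition instead of scanning candidate suffixes:
--     # split at the last separator and dispatch on the resulting token.
--     name = fname.lower()
--     stem, dot, ext = name.rpartition(".")
--     if dot and ext in _EXTS:
--         name = stem
--     base, us, tag = name.rpartition("_")
--     if us:
--         if tag in ("hr", "lr"):
--             return base
--         if tag == "aug":
--             base2, us2, tag2 = base.rpartition("_")
--             if us2 and tag2 in ("hr", "lr"):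
--                 return base2
--     return name
-- ===== Notes on version B (the rewrite author's own statement) =====
-- stated objective: idiomatic
-- what changed: Replaces A's two endswith/break loops over candidate suffix tuples by rpartition-style tokenization from the right: split at the last dot and test the extension token, then split at the last underscore and dispatch on the tag token (with one nested split for the aug case).
import Mathlib
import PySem

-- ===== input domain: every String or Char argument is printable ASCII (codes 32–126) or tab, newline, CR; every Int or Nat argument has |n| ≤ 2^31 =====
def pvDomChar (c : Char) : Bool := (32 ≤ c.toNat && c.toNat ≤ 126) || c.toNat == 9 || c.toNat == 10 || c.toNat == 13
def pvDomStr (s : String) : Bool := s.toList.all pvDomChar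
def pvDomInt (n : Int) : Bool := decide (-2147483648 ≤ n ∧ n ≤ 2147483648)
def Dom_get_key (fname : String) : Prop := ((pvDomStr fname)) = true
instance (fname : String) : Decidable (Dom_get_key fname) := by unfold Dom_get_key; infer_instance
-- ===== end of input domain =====

-- B replaces A's endswith/break candidate-suffix loops by rpartition-style tokenization from the right: split at the last separator and dispatch on the resulting token (objective: idiomatic).

-- ===== PORT A =====
def get_key (fname : String) : String :=
  let name := PySem.Str.lower fname
  -- for ext in (".png", ".jpg", ".jpeg"): if name.endswith(ext): name = name[:-len(ext)]; break
  let name1 :=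
    if PySem.Str.endswith name ".png" then PySem.Str.slice name none (some (-4))
    else if PySem.Str.endswith name ".jpg" then PySem.Str.slice name none (some (-4))
    else if PySem.Str.endswith name ".jpeg" then PySem.Str.slice name none (some (-5))
    else name
  -- for suf in ("_hr_aug", "_lr_aug", "_hr", "_lr"): if name.endswith(suf): name = name[:-len(suf)]; break
  if PySem.Str.endswith name1 "_hr_aug" then PySem.Str.slice name1 none (some (-7))
  else if PySem.Str.endswith name1 "_lr_aug" then PySem.Str.slice name1 none (some (-7))
  else if PySem.Str.endswith name1 "_hr" then PySem.Str.slice name1 none (some (-3))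
  else if PySem.Str.endswith name1 "_lr" then PySem.Str.slice name1 none (some (-3))
  else name1

-- ===== PORT B =====
-- Hand port of Python's s.rpartition(c) for a one-char separator (exact: splits at the LAST
-- occurrence; the middle component is returned as a Bool = "separator found", which is how
-- Source B uses it — truthiness of the middle string).
def pyRPartition (s : String) (c : Char) : String × Bool × String :=
  match (s.toList.reverse).dropWhile (fun x => x != c) with
  | [] => ("", false, s)
  | _ :: b => (String.ofList b.reverse, true,
               String.ofList ((s.toList.reverse).takeWhile (fun x => x != c)).reverse)

def get_key_alt (fname : String) : String :=
  let name := PySem.Str.lower fname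
  let name :=
    if (pyRPartition name '.').2.1 &&
        ((pyRPartition name '.').2.2 == "png" || (pyRPartition name '.').2.2 == "jpg" ||
          (pyRPartition name '.').2.2 == "jpeg") then
      (pyRPartition name '.').1
    else name
  if (pyRPartition name '_').2.1 then
    if (pyRPartition name '_').2.2 == "hr" || (pyRPartition name '_').2.2 == "lr" then
      (pyRPartition name '_').1
    else if (pyRPartition name '_').2.2 == "aug" then
      if (pyRPartition (pyRPartition name '_').1 '_').2.1 &&
          ((pyRPartition (pyRPartition name '_').1 '_').2.2 == "hr" ||
            (pyRPartition (pyRPartition name '_').1 '_').2.2 == "lr") then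
        (pyRPartition (pyRPartition name '_').1 '_').1
      else name
    else name
  else name

-- ===== PRECONDITION & SPEC =====
def Spec_get_key (fname : String) (out : String) : Prop := out = get_key_alt fname
instance (fname : String) (out : String) : Decidable (Spec_get_key fname out) := by unfold Spec_get_key; infer_instance

-- ===== CLAIM (what is proved, stated in full; the proofs are below) =====
def Claim_equal_get_key : Prop := ∀ (fname : String), Dom_get_key fname → Spec_get_key fname (get_key fname)

-- ===== LEMMAS AND PROOFS =====

lemma tw_dw_append (pred : Char → Bool) (xs : List Char) (c : Char) (ys : List Char)
    (hx : ∀ x ∈ xs, pred x = true) (hc : pred c = false) :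
    (xs ++ c :: ys).takeWhile pred = xs ∧ (xs ++ c :: ys).dropWhile pred = c :: ys := by
  induction xs with
  | nil => simp [hc]
  | cons a xs ih =>
    have ha : pred a = true := hx a (by simp)
    have h' := ih (fun x hx' => hx x (by simp [hx']))
    simp [ha, h'.1, h'.2]

lemma rpart_of_decomp (l p t : List Char) (c : Char) (ht : c ∉ t) (h : l = p ++ c :: t) :
    l.reverse.takeWhile (fun x => x != c) = t.reverse ∧
    l.reverse.dropWhile (fun x => x != c) = c :: p.reverse := by
  subst h
  have hx : ∀ x ∈ t.reverse, (x != c) = true := by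
    intro x hx; simp at hx ⊢; rintro rfl; exact ht hx
  have h' := tw_dw_append (fun x => x != c) t.reverse c p.reverse hx (by simp)
  constructor
  · simpa [List.reverse_append] using h'.1
  · simpa [List.reverse_append] using h'.2

lemma pred_head_dropWhile (p : Char → Bool) (l : List Char) (d : Char) (b : List Char)
    (h : l.dropWhile p = d :: b) : p d = false := by
  induction l with
  | nil => simp [List.dropWhile] at h
  | cons a l ih =>
    by_cases ha : p a
    · exact ih (by simpa [List.dropWhile_cons, ha] using h)
    · rw [List.dropWhile_cons_of_neg ha] at h
      cases h; simpa using ha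

lemma decomp_of_rpart (l b : List Char) (c d : Char)
    (h : l.reverse.dropWhile (fun x => x != c) = d :: b) :
    d = c ∧ l = b.reverse ++ c :: (l.reverse.takeWhile (fun x => x != c)).reverse ∧
      c ∉ (l.reverse.takeWhile (fun x => x != c)).reverse := by
  have hd : (d != c) = false := pred_head_dropWhile (fun x => x != c) l.reverse d b h
  have hdc : d = c := by simpa using hd
  rw [hdc] at h
  have hsplit : l.reverse.takeWhile (fun x => x != c) ++ (c :: b) = l.reverse := by
    rw [← h]; exact List.takeWhile_append_dropWhile
  refine ⟨hdc, ?_, ?_⟩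
  · have := congrArg List.reverse hsplit
    simpa [List.reverse_append] using this.symm
  · intro hc
    have hc' : c ∈ l.reverse.takeWhile (fun x => x != c) := by simpa using hc
    have := List.mem_takeWhile_imp hc'
    simp at this

lemma tag_uniq (l p p' a t : List Char) (c : Char) (ha : c ∉ a) (ht : c ∉ t)
    (h1 : l = p ++ c :: a) (h2 : l = p' ++ c :: t) : a = t ∧ p = p' := by
  have r1 := rpart_of_decomp l p a c ha h1
  have r2 := rpart_of_decomp l p' t c ht h2
  constructor
  · exact List.reverse_injective (r1.1.symm.trans r2.1)
  · have h3 := r1.2.symm.trans r2.2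
    exact List.reverse_injective (by injection h3)

lemma endswith_true_iff (n p : String) :
    PySem.Str.endswith n p = true ↔ p.toList <:+ n.toList := by
  simp [PySem.Chars.endswith_iff]

lemma rpart_stem (n : String) (c : Char) (p t : List Char) (ht : c ∉ t)
    (h : n.toList = p ++ c :: t) :
    pyRPartition n c = (String.ofList p, true, String.ofList t) := by
  have hr := rpart_of_decomp n.toList p t c ht h
  unfold pyRPartition
  rw [hr.2, hr.1]
  simp

lemma rpart_none (n : String) (c : Char) (h : c ∉ n.toList) :
    pyRPartition n c = ("", false, n) := by
  unfold pyRPartition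
  have hd : n.toList.reverse.dropWhile (fun x => x != c) = [] := by
    rw [List.dropWhile_eq_nil_iff]
    intro x hx; simp at hx ⊢; rintro rfl; exact h hx
  rw [hd]

lemma ofList_beq (t u : List Char) : (String.ofList t == String.ofList u) = decide (t = u) := by
  by_cases h : t = u
  · simp [h]
  · simp only [h, decide_false]
    rw [beq_eq_false_iff_ne]
    intro hc
    exact h (by simpa using congrArg String.toList hc)

lemma slice_eq (n : String) (p suf : List Char) (k : ℕ) (kI : Int) (hkI : kI = -(k : ℤ))
    (hk : 0 < k) (hl : suf.length = k) (h : n.toList = p ++ suf) :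
    PySem.Str.slice n none (some kI) = String.ofList p := by
  apply String.toList_inj.mp
  rw [PySem.Str.toList_slice, PySem.Chars.slice_eq_listSlice, hkI,
    PySem.List.slice_to_neg_natCast _ _ hk]
  simp [h, hl]

lemma ofList_beq_lit (t : List Char) (u : String) :
    (String.ofList t == u) = decide (t = u.toList) := by
  conv_lhs => rw [← String.ofList_toList (s := u)]
  exact ofList_beq t u.toList

lemma endswith_imp_tag (n p : String) (c : Char) (b' a pre t : List Char)
    (ha : c ∉ a) (ht : c ∉ t) (hd : n.toList = b' ++ c :: a) (hpt : p.toList = pre ++ c :: t)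
    (hc : PySem.Str.endswith n p = true) : a = t := by
  obtain ⟨q, hq⟩ := (endswith_true_iff n p).mp hc
  exact (tag_uniq n.toList b' (q ++ pre) a t c ha ht hd
    (by rw [← hq, hpt, List.append_assoc])).1

lemma endswith_eq_decide (n p : String) (c : Char) (b' a t : List Char)
    (ha : c ∉ a) (ht : c ∉ t) (hd : n.toList = b' ++ c :: a) (hpt : p.toList = c :: t) :
    PySem.Str.endswith n p = decide (a = t) := by
  by_cases hat : a = t
  · subst hat
    have h' : PySem.Str.endswith n p = true :=
      (endswith_true_iff n p).mpr ⟨b', by rw [hpt, ← hd]⟩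
    rw [h']
    simp
  · simp only [hat, decide_false]
    exact Bool.eq_false_iff.mpr fun hc =>
      hat (endswith_imp_tag n p c b' a [] t ha ht hd (by simpa using hpt) hc)

lemma stage1 (n : String) :
    (if PySem.Str.endswith n ".png" then PySem.Str.slice n none (some (-4))
     else if PySem.Str.endswith n ".jpg" then PySem.Str.slice n none (some (-4))
     else if PySem.Str.endswith n ".jpeg" then PySem.Str.slice n none (some (-5))
     else n)
    = (if (pyRPartition n '.').2.1 &&
          ((pyRPartition n '.').2.2 == "png" || (pyRPartition n '.').2.2 == "jpg" ||
            (pyRPartition n '.').2.2 == "jpeg") then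
        (pyRPartition n '.').1
      else n) := by
  have hl1 : ("png" : String).toList = ['p','n','g'] := by decide
  have hl2 : ("jpg" : String).toList = ['j','p','g'] := by decide
  have hl3 : ("jpeg" : String).toList = ['j','p','e','g'] := by decide
  rcases h : n.toList.reverse.dropWhile (fun x => x != '.') with _ | ⟨d, b⟩
  · have hall := List.dropWhile_eq_nil_iff.mp h
    have hno : '.' ∉ n.toList := fun hm => by
      have := hall '.' (by simpa using hm); simp at this
    have hrp := rpart_none n '.' hno
    have e1 : PySem.Str.endswith n ".png" = false := Bool.eq_false_iff.mpr fun hc =>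
      hno (((endswith_true_iff n ".png").mp hc).subset (by decide))
    have e2 : PySem.Str.endswith n ".jpg" = false := Bool.eq_false_iff.mpr fun hc =>
      hno (((endswith_true_iff n ".jpg").mp hc).subset (by decide))
    have e3 : PySem.Str.endswith n ".jpeg" = false := Bool.eq_false_iff.mpr fun hc =>
      hno (((endswith_true_iff n ".jpeg").mp hc).subset (by decide))
    rw [e1, e2, e3]
    simp [hrp]
  · obtain ⟨hdc, hdecomp, hnotin⟩ := decomp_of_rpart n.toList b '.' d h
    set a := (n.toList.reverse.takeWhile (fun x => x != '.')).reverse with ha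
    have hrp := rpart_stem n '.' b.reverse a hnotin hdecomp
    have e1 := endswith_eq_decide n ".png" '.' b.reverse a ['p','n','g'] hnotin (by decide)
      hdecomp (by decide)
    have e2 := endswith_eq_decide n ".jpg" '.' b.reverse a ['j','p','g'] hnotin (by decide)
      hdecomp (by decide)
    have e3 := endswith_eq_decide n ".jpeg" '.' b.reverse a ['j','p','e','g'] hnotin (by decide)
      hdecomp (by decide)
    rw [e1, e2, e3, hrp]
    simp only [ofList_beq_lit, hl1, hl2, hl3]
    by_cases h1 : a = ['p','n','g']
    · rw [slice_eq n b.reverse ('.' :: a) 4 (-4) (by norm_num) (by omega) (by simp [h1]) hdecomp]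
      simp [h1]
    · by_cases h2 : a = ['j','p','g']
      · rw [slice_eq n b.reverse ('.' :: a) 4 (-4) (by norm_num) (by omega) (by simp [h2]) hdecomp]
        simp [h2]
      · by_cases h3 : a = ['j','p','e','g']
        · rw [slice_eq n b.reverse ('.' :: a) 5 (-5) (by norm_num) (by omega) (by simp [h3])
            hdecomp]
          simp [h3]
        · simp [h1, h2, h3]

lemma stage2 (n : String) :
    (if PySem.Str.endswith n "_hr_aug" then PySem.Str.slice n none (some (-7))
     else if PySem.Str.endswith n "_lr_aug" then PySem.Str.slice n none (some (-7))
     else if PySem.Str.endswith n "_hr" then PySem.Str.slice n none (some (-3))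
     else if PySem.Str.endswith n "_lr" then PySem.Str.slice n none (some (-3))
     else n)
    = (if (pyRPartition n '_').2.1 then
        if (pyRPartition n '_').2.2 == "hr" || (pyRPartition n '_').2.2 == "lr" then
          (pyRPartition n '_').1
        else if (pyRPartition n '_').2.2 == "aug" then
          if (pyRPartition (pyRPartition n '_').1 '_').2.1 &&
              ((pyRPartition (pyRPartition n '_').1 '_').2.2 == "hr" ||
                (pyRPartition (pyRPartition n '_').1 '_').2.2 == "lr") then
            (pyRPartition (pyRPartition n '_').1 '_').1
          else n
        else n
      else n) := by
  have p1 : ("_hr_aug" : String).toList = ['_','h','r'] ++ '_' :: ['a','u','g'] := by decide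
  have p2 : ("_lr_aug" : String).toList = ['_','l','r'] ++ '_' :: ['a','u','g'] := by decide
  have p3 : ("_hr" : String).toList = '_' :: ['h','r'] := by decide
  have p4 : ("_lr" : String).toList = '_' :: ['l','r'] := by decide
  have hlh : ("hr" : String).toList = ['h','r'] := by decide
  have hll : ("lr" : String).toList = ['l','r'] := by decide
  have hla : ("aug" : String).toList = ['a','u','g'] := by decide
  rcases h : n.toList.reverse.dropWhile (fun x => x != '_') with _ | ⟨d, b⟩
  · have hall := List.dropWhile_eq_nil_iff.mp h
    have hno : '_' ∉ n.toList := fun hm => by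
      have := hall '_' (by simpa using hm); simp at this
    have e1 : PySem.Str.endswith n "_hr_aug" = false := Bool.eq_false_iff.mpr fun hc =>
      hno (((endswith_true_iff n "_hr_aug").mp hc).subset (by decide))
    have e2 : PySem.Str.endswith n "_lr_aug" = false := Bool.eq_false_iff.mpr fun hc =>
      hno (((endswith_true_iff n "_lr_aug").mp hc).subset (by decide))
    have e3 : PySem.Str.endswith n "_hr" = false := Bool.eq_false_iff.mpr fun hc =>
      hno (((endswith_true_iff n "_hr").mp hc).subset (by decide))
    have e4 : PySem.Str.endswith n "_lr" = false := Bool.eq_false_iff.mpr fun hc =>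
      hno (((endswith_true_iff n "_lr").mp hc).subset (by decide))
    rw [e1, e2, e3, e4]
    simp [rpart_none n '_' hno]
  · obtain ⟨hdc, hdecomp, hnotin⟩ := decomp_of_rpart n.toList b '_' d h
    set a := (n.toList.reverse.takeWhile (fun x => x != '_')).reverse with ha
    have hrp := rpart_stem n '_' b.reverse a hnotin hdecomp
    have e3 := endswith_eq_decide n "_hr" '_' b.reverse a ['h','r'] hnotin (by decide) hdecomp p3
    have e4 := endswith_eq_decide n "_lr" '_' b.reverse a ['l','r'] hnotin (by decide) hdecomp p4
    by_cases h1 : a = ['h','r']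
    · have e1 : PySem.Str.endswith n "_hr_aug" = false := Bool.eq_false_iff.mpr fun hc => by
        have := endswith_imp_tag n "_hr_aug" '_' b.reverse a ['_','h','r'] ['a','u','g']
          hnotin (by decide) hdecomp p1 hc
        rw [h1] at this; exact absurd this (by decide)
      have e2 : PySem.Str.endswith n "_lr_aug" = false := Bool.eq_false_iff.mpr fun hc => by
        have := endswith_imp_tag n "_lr_aug" '_' b.reverse a ['_','l','r'] ['a','u','g']
          hnotin (by decide) hdecomp p2 hc
        rw [h1] at this; exact absurd this (by decide)
      rw [e1, e2, e3,
        slice_eq n b.reverse ('_' :: a) 3 (-3) (by norm_num) (by omega) (by simp [h1]) hdecomp]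
      simp [hrp, h1]
    · by_cases h2 : a = ['l','r']
      · have e1 : PySem.Str.endswith n "_hr_aug" = false := Bool.eq_false_iff.mpr fun hc => by
          have := endswith_imp_tag n "_hr_aug" '_' b.reverse a ['_','h','r'] ['a','u','g']
            hnotin (by decide) hdecomp p1 hc
          rw [h2] at this; exact absurd this (by decide)
        have e2 : PySem.Str.endswith n "_lr_aug" = false := Bool.eq_false_iff.mpr fun hc => by
          have := endswith_imp_tag n "_lr_aug" '_' b.reverse a ['_','l','r'] ['a','u','g']
            hnotin (by decide) hdecomp p2 hc
          rw [h2] at this; exact absurd this (by decide)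
        rw [e1, e2, e3, e4,
          slice_eq n b.reverse ('_' :: a) 3 (-3) (by norm_num) (by omega) (by simp [h2]) hdecomp]
        simp [hrp, h2]
      · by_cases h3 : a = ['a','u','g']
        · by_cases hm : '_' ∈ b.reverse
          · rcases hdw : (b.reverse).reverse.dropWhile (fun x => x != '_') with _ | ⟨d2, b2⟩
            · exfalso
              have hall2 := List.dropWhile_eq_nil_iff.mp hdw
              have := hall2 '_' (by simpa using hm); simp at this
            · obtain ⟨hdc2, hdecomp2, hnotin2⟩ := decomp_of_rpart b.reverse b2 '_' d2 hdw
              set a2 := ((b.reverse).reverse.takeWhile (fun x => x != '_')).reverse with ha2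
              have nested := rpart_stem (String.ofList b.reverse) '_' b2.reverse a2 hnotin2
                (by simpa using hdecomp2)
              have hfull : n.toList = (b2.reverse ++ '_' :: a2) ++ '_' :: a := by
                rw [hdecomp, hdecomp2]
              by_cases k1 : a2 = ['h','r']
              · have e1 : PySem.Str.endswith n "_hr_aug" = true :=
                  (endswith_true_iff _ _).mpr ⟨b2.reverse, by rw [p1, hfull, k1, h3]; simp⟩
                rw [e1, slice_eq n b2.reverse ['_','h','r','_','a','u','g'] 7 (-7) (by norm_num)
                  (by omega) (by decide) (by rw [hfull, k1, h3]; simp)]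
                simp [hrp, nested, h3, k1]
              · have e1 : PySem.Str.endswith n "_hr_aug" = false := Bool.eq_false_iff.mpr
                  fun hc => by
                    obtain ⟨q, hq⟩ := (endswith_true_iff n "_hr_aug").mp hc
                    have hdec2 : n.toList = (q ++ ['_','h','r']) ++ '_' :: ['a','u','g'] := by
                      rw [← hq, p1]; simp
                    have t1 := tag_uniq n.toList b.reverse (q ++ ['_','h','r']) a ['a','u','g']
                      '_' hnotin (by decide) hdecomp hdec2
                    have t2 := tag_uniq b.reverse b2.reverse q a2 ['h','r'] '_' hnotin2
                      (by decide) hdecomp2 (by rw [t1.2])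
                    exact absurd t2.1 k1
                by_cases k2 : a2 = ['l','r']
                · have e2 : PySem.Str.endswith n "_lr_aug" = true :=
                    (endswith_true_iff _ _).mpr ⟨b2.reverse, by rw [p2, hfull, k2, h3]; simp⟩
                  rw [e1, e2, slice_eq n b2.reverse ['_','l','r','_','a','u','g'] 7 (-7)
                    (by norm_num) (by omega) (by decide) (by rw [hfull, k2, h3]; simp)]
                  simp [hrp, nested, h3, k2]
                · have e2 : PySem.Str.endswith n "_lr_aug" = false := Bool.eq_false_iff.mpr
                    fun hc => by
                      obtain ⟨q, hq⟩ := (endswith_true_iff n "_lr_aug").mp hc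
                      have hdec2 : n.toList = (q ++ ['_','l','r']) ++ '_' :: ['a','u','g'] := by
                        rw [← hq, p2]; simp
                      have t1 := tag_uniq n.toList b.reverse (q ++ ['_','l','r']) a ['a','u','g']
                        '_' hnotin (by decide) hdecomp hdec2
                      have t2 := tag_uniq b.reverse b2.reverse q a2 ['l','r'] '_' hnotin2
                        (by decide) hdecomp2 (by rw [t1.2])
                      exact absurd t2.1 k2
                  rw [e1, e2, e3, e4]
                  simp [hrp, nested, ofList_beq_lit, hlh, hll, h3, k1, k2]
          · have nested := rpart_none (String.ofList b.reverse) '_' (by simpa using hm)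
            have e1 : PySem.Str.endswith n "_hr_aug" = false := Bool.eq_false_iff.mpr
              fun hc => by
                obtain ⟨q, hq⟩ := (endswith_true_iff n "_hr_aug").mp hc
                have hdec2 : n.toList = (q ++ ['_','h','r']) ++ '_' :: ['a','u','g'] := by
                  rw [← hq, p1]; simp
                have t1 := tag_uniq n.toList b.reverse (q ++ ['_','h','r']) a ['a','u','g']
                  '_' hnotin (by decide) hdecomp hdec2
                exact hm (by rw [t1.2]; simp)
            have e2 : PySem.Str.endswith n "_lr_aug" = false := Bool.eq_false_iff.mpr
              fun hc => by
                obtain ⟨q, hq⟩ := (endswith_true_iff n "_lr_aug").mp hc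
                have hdec2 : n.toList = (q ++ ['_','l','r']) ++ '_' :: ['a','u','g'] := by
                  rw [← hq, p2]; simp
                have t1 := tag_uniq n.toList b.reverse (q ++ ['_','l','r']) a ['a','u','g']
                  '_' hnotin (by decide) hdecomp hdec2
                exact hm (by rw [t1.2]; simp)
            rw [e1, e2, e3, e4]
            simp [hrp, nested, ofList_beq_lit, hlh, hll, h3]
        · have e1 : PySem.Str.endswith n "_hr_aug" = false := Bool.eq_false_iff.mpr fun hc =>
            h3 (endswith_imp_tag n "_hr_aug" '_' b.reverse a ['_','h','r'] ['a','u','g']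
              hnotin (by decide) hdecomp p1 hc)
          have e2 : PySem.Str.endswith n "_lr_aug" = false := Bool.eq_false_iff.mpr fun hc =>
            h3 (endswith_imp_tag n "_lr_aug" '_' b.reverse a ['_','l','r'] ['a','u','g']
              hnotin (by decide) hdecomp p2 hc)
          rw [e1, e2, e3, e4]
          simp [hrp, ofList_beq_lit, hlh, hll, hla, h1, h2, h3]

-- ===== VERDICT (by name: the statement is the Claim_ definition above) =====
theorem get_key_spec : Claim_equal_get_key := by
  intro fname _
  unfold Spec_get_key get_key get_key_alt
  simp only [stage1, stage2]
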